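-- pv_equiv track=rewrite | github.com/ericdiaz78/ai-model-repo | scripts/ingest_openrouter.py | infer_routing_tags
-- ===== SOURCE A (Python) =====
-- def infer_routing_tags(or_model: dict) -> list[str]:
--     """Generate starter routing tags from model name and description. Low confidence — human should refine."""
--     tags = []
--     name = (or_model.get("name", "") + " " + or_model.get("description", "")).lower()
--     if any(w in name for w in ["code", "codex", "coder", "dev"]):
--         tags.append("coding")
--     if any(w in name for w in ["vision", "image", "vl", "visual"]):
--         tags.append("vision")
--     if any(w in name for w in ["instruct", "chat"]):
--         tags.append("chat")
--     if any(w in name for w in ["fast", "flash", "lite", "mini", "small", "haiku"]):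
--         tags.append("fast-response")
--         tags.append("low-cost")
--     if any(w in name for w in ["reasoning", "think", "r1", "o1", "o3"]):
--         tags.append("reasoning")
--     if any(w in name for w in ["pro", "opus", "ultra", "large", "plus"]):
--         tags.append("analysis")
--     if not tags:
--         tags.append("general")
--     return tags
-- ===== SOURCE B (Python) =====
-- KEYWORD_GROUP = {
--     "code": 0, "codex": 0, "coder": 0, "dev": 0,
--     "vision": 1, "image": 1, "vl": 1, "visual": 1,
--     "instruct": 2, "chat": 2,
--     "fast": 3, "flash": 3, "lite": 3, "mini": 3, "small": 3, "haiku": 3,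
--     "reasoning": 4, "think": 4, "r1": 4, "o1": 4, "o3": 4,
--     "pro": 5, "opus": 5, "ultra": 5, "large": 5, "plus": 5,
-- }
-- GROUP_TAGS = [["coding"], ["vision"], ["chat"],
--               ["fast-response", "low-cost"], ["reasoning"], ["analysis"]]
--
--
-- def infer_routing_tags(or_model: dict) -> list[str]:
--     """Generate starter routing tags from model name and description. Low confidence — human should refine."""
--     name = (or_model.get("name", "") + " " + or_model.get("description", "")).lower()
--     matched = sorted({g for kw, g in KEYWORD_GROUP.items() if kw in name})
--     tags = [t for g in matched for t in GROUP_TAGS[g]]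
--     return tags or ["general"]
-- ===== Notes on version B (the rewrite author's own statement) =====
-- stated objective: alternative
-- what changed: Inverts the rule structure: instead of six per-rule if/any/append blocks, B uses a flat keyword->group-index map, collects the set of matched group indices in one comprehension, sorts it, and flattens each matched group's tags from an indexed table (with the default tag when nothing matched).
import Mathlib
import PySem

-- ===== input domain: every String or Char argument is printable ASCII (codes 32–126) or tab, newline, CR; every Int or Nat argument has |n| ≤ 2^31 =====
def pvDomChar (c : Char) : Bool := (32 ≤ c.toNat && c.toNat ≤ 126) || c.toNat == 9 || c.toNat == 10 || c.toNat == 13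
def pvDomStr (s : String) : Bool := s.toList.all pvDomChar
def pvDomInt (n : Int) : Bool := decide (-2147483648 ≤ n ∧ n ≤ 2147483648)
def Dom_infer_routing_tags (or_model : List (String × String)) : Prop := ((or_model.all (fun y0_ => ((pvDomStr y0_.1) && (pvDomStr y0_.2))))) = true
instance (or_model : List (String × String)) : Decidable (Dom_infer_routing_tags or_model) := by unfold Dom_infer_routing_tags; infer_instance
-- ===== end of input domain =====

-- B inverts the rule structure: a flat keyword→group-index map, a set of matched group indices, sorted and flattened through an indexed tag table; same return value, same cost (objective: alternative).

-- ===== PORT A =====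
-- dict.get(k, dflt) on the association list (first match, per the type convention)
def pvGet (d : List (String × String)) (k dflt : String) : String :=
  ((d.find? (fun p => p.1 == k)).map (·.2)).getD dflt

def infer_routing_tags (or_model : List (String × String)) : List String :=
  let name := PySem.Str.lower (pvGet or_model "name" "" ++ " " ++ pvGet or_model "description" "")
  let tags : List String := []
  let tags := if ["code", "codex", "coder", "dev"].any (fun w => PySem.Str.isIn w name) then tags ++ ["coding"] else tags
  let tags := if ["vision", "image", "vl", "visual"].any (fun w => PySem.Str.isIn w name) then tags ++ ["vision"] else tags
  let tags := if ["instruct", "chat"].any (fun w => PySem.Str.isIn w name) then tags ++ ["chat"] else tags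
  let tags := if ["fast", "flash", "lite", "mini", "small", "haiku"].any (fun w => PySem.Str.isIn w name) then tags ++ ["fast-response"] ++ ["low-cost"] else tags
  let tags := if ["reasoning", "think", "r1", "o1", "o3"].any (fun w => PySem.Str.isIn w name) then tags ++ ["reasoning"] else tags
  let tags := if ["pro", "opus", "ultra", "large", "plus"].any (fun w => PySem.Str.isIn w name) then tags ++ ["analysis"] else tags
  if tags = [] then tags ++ ["general"] else tags

-- ===== PORT B =====
-- flat keyword → group-index map (Python dict KEYWORD_GROUP, in insertion order)
def pvKeywordGroup : List (String × Int) :=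
  [ ("code", 0), ("codex", 0), ("coder", 0), ("dev", 0),
    ("vision", 1), ("image", 1), ("vl", 1), ("visual", 1),
    ("instruct", 2), ("chat", 2),
    ("fast", 3), ("flash", 3), ("lite", 3), ("mini", 3), ("small", 3), ("haiku", 3),
    ("reasoning", 4), ("think", 4), ("r1", 4), ("o1", 4), ("o3", 4),
    ("pro", 5), ("opus", 5), ("ultra", 5), ("large", 5), ("plus", 5) ]

def pvGroupTags : List (List String) :=
  [["coding"], ["vision"], ["chat"], ["fast-response", "low-cost"], ["reasoning"], ["analysis"]]

def infer_routing_tags_alt (or_model : List (String × String)) : List String :=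
  let name := PySem.Str.lower (pvGet or_model "name" "" ++ " " ++ pvGet or_model "description" "")
  -- sorted({g for kw, g in KEYWORD_GROUP.items() if kw in name})
  let matched : List Int :=
    PySem.List.sorted
      (PySem.Set.ofList ((pvKeywordGroup.filter (fun p => PySem.Str.isIn p.1 name)).map (·.2)))
      (fun g => g) false
  -- [t for g in matched for t in GROUP_TAGS[g]]  (g is always a valid index, so the default is never used)
  let tags := matched.flatMap (fun g => PySem.List.pyGetD pvGroupTags g [])
  if tags.isEmpty then ["general"] else tags

-- ===== PRECONDITION & SPEC =====
def Spec_infer_routing_tags (or_model : List (String × String)) (out : List String) : Prop := out = infer_routing_tags_alt or_model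
instance (or_model : List (String × String)) (out : List String) : Decidable (Spec_infer_routing_tags or_model out) := by unfold Spec_infer_routing_tags; infer_instance

-- ===== CLAIM (what is proved, stated in full; the proofs are below) =====
def Claim_equal_infer_routing_tags : Prop := ∀ (or_model : List (String × String)), Dom_infer_routing_tags or_model → Spec_infer_routing_tags or_model (infer_routing_tags or_model)

-- ===== LEMMAS AND PROOFS =====

-- the six keyword groups of pvKeywordGroup
def pvG0 : List (String × Int) := [("code", 0), ("codex", 0), ("coder", 0), ("dev", 0)]
def pvG1 : List (String × Int) := [("vision", 1), ("image", 1), ("vl", 1), ("visual", 1)]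
def pvG2 : List (String × Int) := [("instruct", 2), ("chat", 2)]
def pvG3 : List (String × Int) := [("fast", 3), ("flash", 3), ("lite", 3), ("mini", 3), ("small", 3), ("haiku", 3)]
def pvG4 : List (String × Int) := [("reasoning", 4), ("think", 4), ("r1", 4), ("o1", 4), ("o3", 4)]
def pvG5 : List (String × Int) := [("pro", 5), ("opus", 5), ("ultra", 5), ("large", 5), ("plus", 5)]

theorem pvKG_split : pvKeywordGroup = pvG0 ++ (pvG1 ++ (pvG2 ++ (pvG3 ++ (pvG4 ++ pvG5)))) := rfl

theorem pvAdd_of_mem {s : PySem.Set Int} {x : Int} (h : x ∈ s) : PySem.Set.add s x = s := by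
  simp [PySem.Set.add, PySem.Set.contains, h]

theorem pvFoldlAdd_const (s : PySem.Set Int) (l : List Int) (g : Int) (h : ∀ x ∈ l, x = g) :
    l.foldl PySem.Set.add s = if l.isEmpty then s else PySem.Set.add s g := by
  induction l generalizing s with
  | nil => simp
  | cons a t ih =>
    have ha : a = g := h a (by simp)
    subst ha
    have ht : ∀ x ∈ t, x = a := fun x hx => h x (List.mem_cons_of_mem _ hx)
    have idem : PySem.Set.add (PySem.Set.add s a) a = PySem.Set.add s a :=
      pvAdd_of_mem (by simp [PySem.Set.mem_add])
    simp only [List.foldl_cons, ih _ ht, List.isEmpty_cons]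
    by_cases he : t.isEmpty
    · simp [he]
    · simp [he, idem]

theorem pvStep (name : String) (s : PySem.Set Int) (G : List (String × Int)) (g : Int)
    (h : ∀ x ∈ G.map (·.2), x = g) :
    ((G.filter (fun p => PySem.Str.isIn p.1 name)).map (·.2)).foldl PySem.Set.add s
      = if G.any (fun p => PySem.Str.isIn p.1 name) then PySem.Set.add s g else s := by
  have h' : ∀ x ∈ (G.filter (fun p => PySem.Str.isIn p.1 name)).map (·.2), x = g := by
    intro x hx
    obtain ⟨p, hp, rfl⟩ := List.mem_map.mp hx
    exact h _ (List.mem_map_of_mem (List.mem_of_mem_filter hp))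
  rw [pvFoldlAdd_const s _ g h']
  by_cases hA : G.any (fun p => PySem.Str.isIn p.1 name) = true
  · have hne : ((G.filter (fun p => PySem.Str.isIn p.1 name)).map (·.2)).isEmpty = false := by
      obtain ⟨p, hp, hPp⟩ := List.any_eq_true.mp hA
      have hmem : p.2 ∈ (G.filter (fun p => PySem.Str.isIn p.1 name)).map (·.2) :=
        List.mem_map_of_mem (List.mem_filter.mpr ⟨hp, hPp⟩)
      exact List.isEmpty_eq_false_iff.mpr (List.ne_nil_of_mem hmem)
    rw [hne, hA]
    simp
  · have hA' := hA
    simp only [List.any_eq_true, not_exists, not_and] at hA'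
    have hflt : G.filter (fun p => PySem.Str.isIn p.1 name) = [] :=
      List.filter_eq_nil_iff.mpr hA'
    rw [Bool.not_eq_true] at hA
    rw [hflt, hA]
    simp

theorem pvFinal (name : String) :
    (let tags : List String := []
     let tags := if ["code", "codex", "coder", "dev"].any (fun w => PySem.Str.isIn w name) then tags ++ ["coding"] else tags
     let tags := if ["vision", "image", "vl", "visual"].any (fun w => PySem.Str.isIn w name) then tags ++ ["vision"] else tags
     let tags := if ["instruct", "chat"].any (fun w => PySem.Str.isIn w name) then tags ++ ["chat"] else tags
     let tags := if ["fast", "flash", "lite", "mini", "small", "haiku"].any (fun w => PySem.Str.isIn w name) then tags ++ ["fast-response"] ++ ["low-cost"] else tags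
     let tags := if ["reasoning", "think", "r1", "o1", "o3"].any (fun w => PySem.Str.isIn w name) then tags ++ ["reasoning"] else tags
     let tags := if ["pro", "opus", "ultra", "large", "plus"].any (fun w => PySem.Str.isIn w name) then tags ++ ["analysis"] else tags
     if tags = [] then tags ++ ["general"] else tags)
    = (let matched : List Int :=
         PySem.List.sorted
           (PySem.Set.ofList ((pvKeywordGroup.filter (fun p => PySem.Str.isIn p.1 name)).map (·.2)))
           (fun g => g) false
       let tags := matched.flatMap (fun g => PySem.List.pyGetD pvGroupTags g [])
       if tags.isEmpty then ["general"] else tags) := by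
  show _ = (if _ then _ else _)
  rw [PySem.Set.ofList_eq_foldl, pvKG_split]
  simp only [List.filter_append, List.map_append, List.foldl_append]
  rw [pvStep name _ pvG0 0 (by decide), pvStep name _ pvG1 1 (by decide),
      pvStep name _ pvG2 2 (by decide), pvStep name _ pvG3 3 (by decide),
      pvStep name _ pvG4 4 (by decide), pvStep name _ pvG5 5 (by decide)]
  have e0 : pvG0.any (fun p => PySem.Str.isIn p.1 name) = ["code", "codex", "coder", "dev"].any (fun w => PySem.Str.isIn w name) := rfl
  have e1 : pvG1.any (fun p => PySem.Str.isIn p.1 name) = ["vision", "image", "vl", "visual"].any (fun w => PySem.Str.isIn w name) := rfl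
  have e2 : pvG2.any (fun p => PySem.Str.isIn p.1 name) = ["instruct", "chat"].any (fun w => PySem.Str.isIn w name) := rfl
  have e3 : pvG3.any (fun p => PySem.Str.isIn p.1 name) = ["fast", "flash", "lite", "mini", "small", "haiku"].any (fun w => PySem.Str.isIn w name) := rfl
  have e4 : pvG4.any (fun p => PySem.Str.isIn p.1 name) = ["reasoning", "think", "r1", "o1", "o3"].any (fun w => PySem.Str.isIn w name) := rfl
  have e5 : pvG5.any (fun p => PySem.Str.isIn p.1 name) = ["pro", "opus", "ultra", "large", "plus"].any (fun w => PySem.Str.isIn w name) := rfl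
  rw [e0, e1, e2, e3, e4, e5]
  generalize ["code", "codex", "coder", "dev"].any (fun w => PySem.Str.isIn w name) = b0
  generalize ["vision", "image", "vl", "visual"].any (fun w => PySem.Str.isIn w name) = b1
  generalize ["instruct", "chat"].any (fun w => PySem.Str.isIn w name) = b2
  generalize ["fast", "flash", "lite", "mini", "small", "haiku"].any (fun w => PySem.Str.isIn w name) = b3
  generalize ["reasoning", "think", "r1", "o1", "o3"].any (fun w => PySem.Str.isIn w name) = b4
  generalize ["pro", "opus", "ultra", "large", "plus"].any (fun w => PySem.Str.isIn w name) = b5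
  revert b0 b1 b2 b3 b4 b5
  decide

theorem infer_routing_tags_eq_alt (or_model : List (String × String)) :
    infer_routing_tags or_model = infer_routing_tags_alt or_model := by
  unfold infer_routing_tags infer_routing_tags_alt
  exact pvFinal (PySem.Str.lower (pvGet or_model "name" "" ++ " " ++ pvGet or_model "description" ""))

-- ===== VERDICT (by name: the statement is the Claim_ definition above) =====
theorem infer_routing_tags_spec : Claim_equal_infer_routing_tags := by
  intro om _
  unfold Spec_infer_routing_tags
  exact infer_routing_tags_eq_alt om
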